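-- pv_equiv track=rewrite | github.com/omripalmon/wordle-assistant | optimal_guess.py | compute_pattern
-- ===== SOURCE A (Python) =====
-- GREEN = 2
--
-- YELLOW = 1
--
-- GRAY = 0
--
-- def compute_pattern(guess: str, secret: str) -> int:
--     """Compute the Wordle feedback pattern for a guess against a secret word.
--
--     Returns an integer in [0, 242] encoding the 5-tile pattern in base 3,
--     where GREEN=2, YELLOW=1, GRAY=0, most-significant trit first.
--
--     The matching uses Wordle's official two-pass rules:
--     1. First pass: mark exact positional matches as GREEN.
--     2. Second pass: for remaining positions, mark YELLOW if the guessed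
--        letter appears among unmatched secret letters (respecting frequency),
--        otherwise GRAY.
--     """
--     result = [GRAY, GRAY, GRAY, GRAY, GRAY]
--     secret_counts: dict[str, int] = {}
--
--     # Build letter frequency for the secret
--     for ch in secret:
--         secret_counts[ch] = secret_counts.get(ch, 0) + 1
--
--     # Pass 1: greens (exact matches)
--     for i in range(5):
--         if guess[i] == secret[i]:
--             result[i] = GREEN
--             secret_counts[guess[i]] -= 1
--
--     # Pass 2: yellows (present but wrong position)
--     for i in range(5):
--         if result[i] == GREEN:
--             continue
--         ch = guess[i]
--         if secret_counts.get(ch, 0) > 0: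
--             result[i] = YELLOW
--             secret_counts[ch] -= 1
--
--     # Encode as base-3 integer
--     val = 0
--     for r in result:
--         val = val * 3 + r
--     return val
-- ===== SOURCE B (Python) =====
-- def compute_pattern(guess: str, secret: str) -> int:
--     """Stateless re-derivation of the Wordle pattern: instead of threading a
--     mutable count dict through a second pass, each tile's colour is computed
--     directly by a closed-form rule: a non-green position i holding letter c is
--     YELLOW iff the number of earlier non-green positions holding c is smaller
--     than the number of c's in the secret not consumed by greens."""
--     def avail(c):
--         return secret.count(c) - sum(1 for i in range(5) if guess[i] == secret[i] == c)
--
--     def trit(i):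
--         if guess[i] == secret[i]:
--             return 2
--         c = guess[i]
--         prior = sum(1 for j in range(i) if guess[j] != secret[j] and guess[j] == c)
--         return 1 if prior < avail(c) else 0
--
--     val = 0
--     for i in range(5):
--         val = val * 3 + trit(i)
--     return val
-- ===== Notes on version B (the rewrite author's own statement) =====
-- stated objective: alternative
-- what changed: Replaces A's stateful second pass (a mutable count dict decremented left-to-right) by a stateless closed-form rule: a non-green tile holding c is YELLOW iff the number of earlier non-green tiles holding c is below the secret's count of c minus the greens of c; no dict is built or mutated.
import Mathlib
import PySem

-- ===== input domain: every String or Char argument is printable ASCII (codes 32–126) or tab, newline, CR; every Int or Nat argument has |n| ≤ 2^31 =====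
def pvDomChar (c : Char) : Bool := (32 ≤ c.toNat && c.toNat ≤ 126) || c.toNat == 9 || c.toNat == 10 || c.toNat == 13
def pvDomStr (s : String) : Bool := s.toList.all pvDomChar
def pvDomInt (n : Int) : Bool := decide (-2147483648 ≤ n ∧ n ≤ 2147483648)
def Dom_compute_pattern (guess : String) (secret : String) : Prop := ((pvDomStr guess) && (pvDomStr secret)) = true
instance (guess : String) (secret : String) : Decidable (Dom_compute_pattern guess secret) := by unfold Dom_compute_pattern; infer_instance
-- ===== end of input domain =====

-- B replaces A's stateful second pass (a mutable count dict decremented left to right)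
-- by a stateless per-tile closed-form rule (objective: alternative; return value only).

-- ===== PORT A =====
-- the dict-building loop and the two pass loop bodies of A, as named helpers
def cpA_counts (sl : List Char) : PySem.Dict Char Int :=
  sl.foldl (fun d ch => d.insert ch (d.getD ch 0 + 1)) PySem.Dict.empty

def cpA_step1 (gl sl : List Char) (st : List Int × PySem.Dict Char Int) (i : Int) :
    List Int × PySem.Dict Char Int :=
  if PySem.List.pyGetD gl i ' ' = PySem.List.pyGetD sl i ' ' then
    (PySem.List.pySetD st.1 i 2,
     st.2.insert (PySem.List.pyGetD gl i ' ')
       (st.2.getD (PySem.List.pyGetD gl i ' ') 0 - 1))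
  else st

def cpA_step2 (gl : List Char) (st : List Int × PySem.Dict Char Int) (i : Int) :
    List Int × PySem.Dict Char Int :=
  if PySem.List.pyGetD st.1 i 0 = 2 then st
  else
    if st.2.getD (PySem.List.pyGetD gl i ' ') 0 > 0 then
      (PySem.List.pySetD st.1 i 1,
       st.2.insert (PySem.List.pyGetD gl i ' ')
         (st.2.getD (PySem.List.pyGetD gl i ' ') 0 - 1))
    else st

def compute_pattern (guess : String) (secret : String) : Int :=
  let gl := guess.toList
  let sl := secret.toList
  let result : List Int := [0, 0, 0, 0, 0]
  let secret_counts := cpA_counts sl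
  let st1 := (PySem.List.pyRange 0 5 1).foldl (cpA_step1 gl sl) (result, secret_counts)
  let st2 := (PySem.List.pyRange 0 5 1).foldl (cpA_step2 gl) st1
  st2.1.foldl (fun val r => val * 3 + r) 0

-- ===== PORT B =====
-- secret.count(c) for a single character c is exactly List.count on the char list.
def cpAvail (gl sl : List Char) (c : Char) : Int :=
  (sl.count c : Int) -
    ((PySem.List.pyRange 0 5 1).map (fun i =>
      if PySem.List.pyGetD gl i ' ' = PySem.List.pyGetD sl i ' ' ∧
         PySem.List.pyGetD sl i ' ' = c then (1 : Int) else 0)).sum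

def cpTrit (gl sl : List Char) (i : Int) : Int :=
  if PySem.List.pyGetD gl i ' ' = PySem.List.pyGetD sl i ' ' then 2
  else
    let c := PySem.List.pyGetD gl i ' '
    let prior := ((PySem.List.pyRange 0 i 1).map (fun j =>
      if ¬(PySem.List.pyGetD gl j ' ' = PySem.List.pyGetD sl j ' ') ∧
         PySem.List.pyGetD gl j ' ' = c then (1 : Int) else 0)).sum
    if prior < cpAvail gl sl c then 1 else 0

def compute_pattern_alt (guess : String) (secret : String) : Int :=
  let gl := guess.toList
  let sl := secret.toList
  (PySem.List.pyRange 0 5 1).foldl (fun val i => val * 3 + cpTrit gl sl i) 0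

-- ===== PRECONDITION & SPEC =====
-- Python A raises IndexError (guess[i] / secret[i] for i in range(5)) unless both
-- strings have at least five characters; exactly those inputs are excluded.
def Pre_compute_pattern (guess : String) (secret : String) : Prop :=
  5 ≤ guess.toList.length ∧ 5 ≤ secret.toList.length
instance (guess : String) (secret : String) : Decidable (Pre_compute_pattern guess secret) := by
  unfold Pre_compute_pattern; infer_instance

def pvWitness_compute_pattern : String × String := ("aabbc", "abaca")

def Spec_compute_pattern (guess : String) (secret : String) (out : Int) : Prop :=
  out = compute_pattern_alt guess secret
instance (guess : String) (secret : String) (out : Int) : Decidable (Spec_compute_pattern guess secret out) := by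
  unfold Spec_compute_pattern; infer_instance

-- ===== CLAIM (what is proved, stated in full; the proofs are below) =====
def Claim_equal_compute_pattern : Prop := ∀ (guess : String) (secret : String),
  Dom_compute_pattern guess secret → Pre_compute_pattern guess secret →
  Spec_compute_pattern guess secret (compute_pattern guess secret)

-- ===== LEMMAS AND PROOFS =====

-- proof-side recursions: cpG = pass-1 decrements; cpYD = A's yellow loop on the
-- non-green tiles; cpY = the same loop with the dict abstracted to a function;
-- cpC = the loop with the greedy supply replaced by the closed form; cpS = the
-- closed form with the prefix count made explicit (B's rule).
def cpG (d : PySem.Dict Char Int) : List Char → PySem.Dict Char Int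
  | [] => d
  | c :: cs => cpG (d.insert c (d.getD c 0 - 1)) cs

def cpYD : List (Int × Char) → List Int × PySem.Dict Char Int → List Int
  | [], st => st.1
  | (i, c) :: ts, st =>
    if st.2.getD c 0 > 0 then
      cpYD ts (PySem.List.pySetD st.1 i 1, st.2.insert c (st.2.getD c 0 - 1))
    else cpYD ts st

def cpY (avail : Char → Int) : List (Int × Char) → List Int → List Int
  | [], res => res
  | (i, c) :: ts, res =>
    if 0 < avail c then
      cpY (fun x => if x = c then avail c - 1 else avail x) ts (PySem.List.pySetD res i 1)
    else cpY avail ts res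

def cpC (avail p : Char → Int) : List (Int × Char) → List Int → List Int
  | [], res => res
  | (i, c) :: ts, res =>
    cpC avail (fun x => if x = c then p c + 1 else p x) ts
      (PySem.List.pySetD res i (if p c < avail c then 1 else 0))

def cpS (avail : Char → Int) (pre : List Char) : List (Int × Char) → List Int → List Int
  | [], res => res
  | (i, c) :: ts, res =>
    cpS avail (pre ++ [c]) ts
      (PySem.List.pySetD res i (if (pre.count c : Int) < avail c then 1 else 0))

theorem cpG_getD (cs : List Char) (d : PySem.Dict Char Int) (c : Char) :
    (cpG d cs).getD c 0 = d.getD c 0 - cs.count c := by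
  induction cs generalizing d with
  | nil => simp [cpG]
  | cons c' cs ih =>
    simp only [cpG, ih, PySem.Dict.getD_insert, List.count_cons]
    by_cases h : c = c'
    · subst h; simp; omega
    · have h' : (c' == c) = false := by simp; exact fun e => h e.symm
      simp [h, h']

theorem cpA_counts_getD (sl : List Char) (c : Char) :
    (cpA_counts sl).getD c 0 = sl.count c := by
  simp [cpA_counts, PySem.Dict.getD_foldl_insert_add_one]

theorem cpYD_eq_cpY (ts : List (Int × Char)) (st : List Int × PySem.Dict Char Int)
    (avail : Char → Int) (hd : ∀ x, st.2.getD x 0 = avail x) :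
    cpYD ts st = cpY avail ts st.1 := by
  induction ts generalizing st avail with
  | nil => simp [cpYD, cpY]
  | cons t ts ih =>
    obtain ⟨i, c⟩ := t
    simp only [cpYD, cpY, hd]
    split_ifs with h
    · exact ih _ _ (fun x => by simp [PySem.Dict.getD_insert, hd])
    · exact ih _ _ hd

theorem cpYD_eq_cpY' (ts : List (Int × Char)) (st : List Int × PySem.Dict Char Int) :
    cpYD ts st = cpY (fun x => st.2.getD x 0) ts st.1 :=
  cpYD_eq_cpY ts st _ (fun _ => rfl)

theorem cpY_eq_cpC (ts : List (Int × Char)) (res : List Int) (avail p : Char → Int)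
    (ha : ∀ x, 0 ≤ avail x) (hp : ∀ x, 0 ≤ p x)
    (hi : ∀ q ∈ ts, 0 ≤ q.1) (hnd : (ts.map Prod.fst).Nodup)
    (hres : ∀ q ∈ ts, res.set q.1.toNat 0 = res) :
    cpY (fun x => avail x - min (p x) (avail x)) ts res = cpC avail p ts res := by
  induction ts generalizing res p with
  | nil => simp [cpY, cpC]
  | cons t ts ih =>
    obtain ⟨i, c⟩ := t
    have hi0 : 0 ≤ i := hi (i, c) (by simp)
    simp only [cpY, cpC]
    have hset : PySem.List.pySetD res i 0 = res.set i.toNat 0 :=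
      PySem.List.pySetD_of_nonneg res 0 hi0
    have hp' : ∀ x, 0 ≤ (fun y => if y = c then p c + 1 else p y) x := by
      intro x; by_cases hx : x = c
      · simp [hx]; have := hp c; omega
      · simp [hx]; exact hp x
    by_cases h : p c < avail c
    · rw [if_pos (show (0:Int) < avail c - min (p c) (avail c) by have := hp c; omega), if_pos h]
      have he : (fun x => if x = c then avail c - min (p c) (avail c) - 1 else avail x - min (p x) (avail x))
          = fun x => avail x - min ((fun y => if y = c then p c + 1 else p y) x) (avail x) := by
        funext x; by_cases hx : x = c
        · subst hx; have := hp x; simp; omega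
        · simp [hx]
      rw [he]
      have hw : PySem.List.pySetD res i 1 = res.set i.toNat 1 :=
        PySem.List.pySetD_of_nonneg res 1 hi0
      have hndc : i ∉ ts.map Prod.fst ∧ (ts.map Prod.fst).Nodup := by
        simpa using hnd
      refine hw ▸ ih _ _ hp' (fun q hq => hi q (by simp [hq])) hndc.2 ?_
      intro q hq
      have hq0 : 0 ≤ q.1 := hi q (by simp [hq])
      have hne : q.1.toNat ≠ i.toNat := by
        intro e
        have : q.1 = i := by omega
        exact hndc.1 (this ▸ List.mem_map_of_mem hq)
      rw [List.set_comm _ _ (Ne.symm hne), hres q (by simp [hq])]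
    · rw [if_neg (show ¬ (0:Int) < avail c - min (p c) (avail c) by have := hp c; have := ha c; omega),
        if_neg h, hset, hres (i, c) (by simp)]
      have he : (fun x => avail x - min (p x) (avail x))
          = fun x => avail x - min ((fun y => if y = c then p c + 1 else p y) x) (avail x) := by
        funext x; by_cases hx : x = c
        · subst hx; have := hp x; have := ha x; simp; omega
        · simp [hx]
      rw [he]
      exact ih _ _ hp' (fun q hq => hi q (by simp [hq]))
        (by simpa using (List.nodup_cons.mp (by simpa using hnd)).2)
        (fun q hq => hres q (by simp [hq]))

theorem cpC_eq_cpS (avail : Char → Int) (ts : List (Int × Char)) (res : List Int)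
    (pre : List Char) :
    cpC avail (fun x => (pre.count x : Int)) ts res = cpS avail pre ts res := by
  induction ts generalizing res pre with
  | nil => simp [cpC, cpS]
  | cons t ts ih =>
    obtain ⟨i, c⟩ := t
    simp only [cpC, cpS]
    have he : (fun x => if x = c then (pre.count c : Int) + 1 else (pre.count x : Int))
        = fun x => (((pre ++ [c]).count x : Nat) : Int) := by
      funext x; by_cases hx : x = c
      · subst hx; simp [List.count_append]
      · have : (c == x) = false := by simp; exact fun e => hx e.symm
        simp [List.count_append, List.count_cons, List.count_nil, hx, this]
    rw [he, ih]

theorem cpY_cpG_counts_eq_cpS (sl cs : List Char) (ts : List (Int × Char)) (res : List Int)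
    (hsub : cs.Sublist sl)
    (hi : ∀ q ∈ ts, 0 ≤ q.1) (hnd : (ts.map Prod.fst).Nodup)
    (hres : ∀ q ∈ ts, res.set q.1.toNat 0 = res) :
    cpY (fun x => (cpG (cpA_counts sl) cs).getD x 0) ts res
      = cpS (fun x => (cpG (cpA_counts sl) cs).getD x 0) [] ts res := by
  have ha : ∀ x, 0 ≤ (cpG (cpA_counts sl) cs).getD x 0 := by
    intro x
    rw [cpG_getD, cpA_counts_getD]
    have := hsub.count_le x
    omega
  have h1 := cpY_eq_cpC ts res (fun x => (cpG (cpA_counts sl) cs).getD x 0)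
    (fun _ => 0) ha (by simp) hi hnd hres
  have he : (fun x => (cpG (cpA_counts sl) cs).getD x 0 -
      min ((fun _ : Char => (0:Int)) x) ((cpG (cpA_counts sl) cs).getD x 0))
      = fun x => (cpG (cpA_counts sl) cs).getD x 0 := by
    funext x; have := ha x; simp; omega
  rw [he] at h1
  rw [h1]
  have h2 := cpC_eq_cpS (fun x => (cpG (cpA_counts sl) cs).getD x 0) ts res []
  simpa using h2

theorem pyGetD_pySetD_ne (res : List Int) (i j v d : Int) (hi : 0 ≤ i) (hj : 0 ≤ j)
    (hne : i ≠ j) : PySem.List.pyGetD (PySem.List.pySetD res i v) j d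
      = PySem.List.pyGetD res j d := by
  rw [PySem.List.pySetD_of_nonneg res v hi]
  rw [show j = ((j.toNat : Nat) : Int) by omega, PySem.List.pyGetD_natCast,
    PySem.List.pyGetD_natCast]
  rw [List.getD_eq_getElem?_getD, List.getD_eq_getElem?_getD,
    List.getElem?_set_ne (by omega)]

theorem pass1_bridge (idxs : List Int) (gl sl : List Char) :
    ∀ (res : List Int) (d : PySem.Dict Char Int),
    List.foldl (cpA_step1 gl sl) (res, d) idxs =
      (List.foldl (fun r i => if PySem.List.pyGetD gl i ' ' = PySem.List.pyGetD sl i ' '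
          then PySem.List.pySetD r i 2 else r) res idxs,
       cpG d (idxs.filterMap (fun i =>
         if PySem.List.pyGetD gl i ' ' = PySem.List.pyGetD sl i ' '
         then some (PySem.List.pyGetD gl i ' ') else none))) := by
  induction idxs with
  | nil => intro res d; simp [cpG]
  | cons i idxs ih =>
    intro res d
    by_cases h : PySem.List.pyGetD gl i ' ' = PySem.List.pyGetD sl i ' '
    · simp only [List.foldl_cons, List.filterMap_cons, cpA_step1, if_pos h, ih, cpG]
    · simp only [List.foldl_cons, List.filterMap_cons, cpA_step1, if_neg h, ih]

theorem pass2_bridge (idxs : List Int) (gl : List Char) :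
    ∀ (res : List Int) (d : PySem.Dict Char Int),
    (∀ i ∈ idxs, 0 ≤ i) → idxs.Nodup →
    (List.foldl (cpA_step2 gl) (res, d) idxs).1 =
      cpYD (idxs.filterMap (fun i => if PySem.List.pyGetD res i 0 = 2 then none
        else some (i, PySem.List.pyGetD gl i ' '))) (res, d) := by
  induction idxs with
  | nil => intro res d _ _; simp [cpYD]
  | cons i idxs ih =>
    intro res d h0 hnd
    have hi0 : 0 ≤ i := h0 i (by simp)
    by_cases hg : PySem.List.pyGetD res i 0 = 2
    · simp only [List.foldl_cons, List.filterMap_cons, cpA_step2, if_pos hg]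
      exact ih res d (fun j hj => h0 j (by simp [hj])) hnd.of_cons
    · simp only [List.foldl_cons, List.filterMap_cons, cpA_step2, if_neg hg, cpYD]
      by_cases hc : d.getD (PySem.List.pyGetD gl i ' ') 0 > 0
      · rw [if_pos hc, if_pos hc]
        rw [ih _ _ (fun j hj => h0 j (by simp [hj])) hnd.of_cons]
        congr 1
        apply List.filterMap_congr
        intro j hj
        have : i ≠ j := by
          rintro rfl; exact (List.nodup_cons.mp hnd).1 hj
        rw [pyGetD_pySetD_ne res i j 1 0 hi0 (h0 j (by simp [hj])) this]
      · rw [if_neg hc, if_neg hc]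
        exact ih res d (fun j hj => h0 j (by simp [hj])) hnd.of_cons

theorem cpEncCongr (a b t u : Int) (h1 : a = b) (h2 : t = u) : a * 3 + t = b * 3 + u := by
  rw [h1, h2]

theorem cpAddCongr (a b t u : Int) (h1 : a = b) (h2 : t = u) : a + t = b + u := by
  rw [h1, h2]

theorem cpIteSub (a b c d e f : Int) (h : b - a = d - c) :
    (if a < b then e else f) = (if c < d then e else f) := by
  have : a < b ↔ c < d := by omega
  simp [this]

theorem cpExists5 {α : Type} (l : List α) (h : 5 ≤ l.length) :
    ∃ a b c d e r, l = a :: b :: c :: d :: e :: r := by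
  rcases l with _|⟨a,_|⟨b,_|⟨c,_|⟨d,_|⟨e,r⟩⟩⟩⟩⟩ <;> simp_all

-- ===== VERDICT (by name: the statement is the Claim_ definition above) =====
set_option maxHeartbeats 1000000 in
theorem compute_pattern_spec : Claim_equal_compute_pattern := by
  intro guess secret hdom hpre
  obtain ⟨hg5, hs5⟩ := hpre
  obtain ⟨g0,g1,g2,g3,g4,gr,hgl⟩ := cpExists5 guess.toList hg5
  obtain ⟨s0,s1,s2,s3,s4,sr,hsl⟩ := cpExists5 secret.toList hs5
  show compute_pattern guess secret = compute_pattern_alt guess secret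
  simp only [compute_pattern, compute_pattern_alt]
  rw [hgl, hsl]
  rw [show PySem.List.pyRange 0 5 1 = ([0,1,2,3,4] : List Int) from by decide]
  rw [pass1_bridge]
  rw [pass2_bridge _ _ _ _ (by decide) (by decide)]
  by_cases hb0 : g0 = s0 <;> by_cases hb1 : g1 = s1 <;> by_cases hb2 : g2 = s2 <;>
    by_cases hb3 : g3 = s3 <;> by_cases hb4 : g4 = s4 <;>
  · simp [hb0, hb1, hb2, hb3, hb4, List.foldl_cons, List.foldl_nil,
      List.filterMap_nil, PySem.List.pyGetD_ofNat', List.getD,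
      PySem.List.pySetD, PySem.List.pySet?, PySem.List.pyIdx?]
    rw [cpYD_eq_cpY']
    rw [cpY_cpG_counts_eq_cpS _ _ _ _
      (by repeat first
            | apply List.nil_sublist
            | apply List.Sublist.cons₂
            | apply List.Sublist.cons)
      (by simp) (by simp) (by intro q hq; fin_cases hq <;> rfl)]
    simp [cpS, cpTrit, cpAvail, cpG_getD, cpA_counts_getD, hb0, hb1, hb2, hb3, hb4,
      PySem.List.pyGetD_ofNat', List.getD, PySem.List.pySetD, PySem.List.pySet?,
      PySem.List.pyIdx?, List.count_cons, List.count_nil,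
      show PySem.List.pyRange 0 0 1 = [] from by decide,
      show PySem.List.pyRange 0 1 1 = [0] from by decide,
      show PySem.List.pyRange 0 2 1 = [0,1] from by decide,
      show PySem.List.pyRange 0 3 1 = [0,1,2] from by decide,
      show PySem.List.pyRange 0 4 1 = [0,1,2,3] from by decide,
      show PySem.List.pyRange 0 5 1 = [0,1,2,3,4] from by decide]
    all_goals (repeat (first | apply cpEncCongr | apply cpAddCongr))
    all_goals (first | rfl | (apply cpIteSub; ring_nf))
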